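-- pv_equiv track=rewrite | github.com/iftrush/CLRS | CH09/SimultaneousMinMax.py | SimultaneousMinMax
-- ===== SOURCE A (Python) =====
-- def SimultaneousMinMax(A):
--
--     n = len(A)
--     i = 0 #index
--
--     if n % 2 == 1:
--         MIN = MAX = A[0]
--         i = 1
--     else:
--         if A[1] >= A[0]:
--             MAX, MIN = A[1], A[0]
--         else:
--             MAX, MIN = A[0], A[1]
--         i = 2
--
--     while i < n:
--         if A[i] >= A[i+1]:
--             MAX = max(MAX,A[i])
--             MIN = min(MIN,A[i+1])
--         else:
--             MAX = max(MAX,A[i+1])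
--             MIN = min(MIN,A[i])
--         i += 2
--
--     return MAX, MIN
-- ===== SOURCE B (Python) =====
-- def SimultaneousMinMax(A):
--     MAX = MIN = A[0]
--     for x in A[1:]:
--         if x > MAX:
--             MAX = x
--         if x < MIN:
--             MIN = x
--     return MAX, MIN
-- ===== Notes on version B (the rewrite author's own statement) =====
-- stated objective: simpler
-- what changed: Replaced the parity-split pairwise two-at-a-time comparison loop with a flat single-pass scan updating MIN and MAX once per element (less per-iteration overhead in CPython).
import Mathlib
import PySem

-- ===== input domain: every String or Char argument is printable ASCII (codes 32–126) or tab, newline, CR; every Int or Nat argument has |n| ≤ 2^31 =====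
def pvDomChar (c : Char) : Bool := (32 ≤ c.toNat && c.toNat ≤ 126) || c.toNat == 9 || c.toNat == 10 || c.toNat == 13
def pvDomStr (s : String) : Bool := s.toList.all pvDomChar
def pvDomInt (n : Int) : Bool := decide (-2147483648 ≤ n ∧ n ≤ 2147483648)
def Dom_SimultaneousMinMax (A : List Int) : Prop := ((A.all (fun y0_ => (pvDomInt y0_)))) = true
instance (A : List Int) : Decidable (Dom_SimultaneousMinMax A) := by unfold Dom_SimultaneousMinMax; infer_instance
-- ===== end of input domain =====

-- B replaces A's parity-split pairwise two-at-a-time scan with a plain single-pass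
-- per-element min/max scan (simpler, same O(n) cost).


-- ===== PORT A =====
-- the while loop: consumes the remaining elements two at a time (i, i+1),
-- exactly A's branch order and max/min updates; state is (MAX, MIN)
def SimultaneousMinMaxLoop : List Int → Int → Int → Int × Int
  | a :: b :: rest, mx, mn =>
      if a ≥ b then SimultaneousMinMaxLoop rest (max mx a) (min mn b)
      else SimultaneousMinMaxLoop rest (max mx b) (min mn a)
  | _, mx, mn => (mx, mn)

def SimultaneousMinMax (A : List Int) : Int × Int :=
  if A.length % 2 == 1 then
    match A with
    | x :: rest => SimultaneousMinMaxLoop rest x x   -- MIN = MAX = A[0]; i = 1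
    | [] => (0, 0)                                   -- unreachable (length 0 is even)
  else
    match A with
    | x :: y :: rest =>                              -- A[0] = x, A[1] = y; i = 2
        if y ≥ x then SimultaneousMinMaxLoop rest y x
        else SimultaneousMinMaxLoop rest x y
    | _ => (0, 0)                                    -- Python raises IndexError on [] (A[1]); outside Pre_

-- ===== PORT B =====
def SimultaneousMinMax_alt (A : List Int) : Int × Int :=
  match A with
  | [] => (0, 0)                                     -- Python raises IndexError on []; outside Pre_
  | x :: xs =>
      xs.foldl (fun (p : Int × Int) y =>
        (if y > p.1 then y else p.1, if y < p.2 then y else p.2)) (x, x)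

-- ===== PRECONDITION & SPEC =====
-- A raises IndexError on the empty list (A[0] or A[1]); B does too.
def Pre_SimultaneousMinMax (A : List Int) : Prop := A ≠ []
instance (A : List Int) : Decidable (Pre_SimultaneousMinMax A) := by unfold Pre_SimultaneousMinMax; infer_instance
def pvWitness_SimultaneousMinMax : List Int := [3, 1, 2]

def Spec_SimultaneousMinMax (A : List Int) (out : Int × Int) : Prop := out = SimultaneousMinMax_alt A
instance (A : List Int) (out : Int × Int) : Decidable (Spec_SimultaneousMinMax A out) := by unfold Spec_SimultaneousMinMax; infer_instance

-- ===== CLAIM (what is proved, stated in full; the proofs are below) =====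
def Claim_equal_SimultaneousMinMax : Prop := ∀ (A : List Int), Dom_SimultaneousMinMax A → Pre_SimultaneousMinMax A → Spec_SimultaneousMinMax A (SimultaneousMinMax A)

-- ===== LEMMAS AND PROOFS =====

-- B's per-element update is the max/min step
def pvStep (p : Int × Int) (y : Int) : Int × Int := (max p.1 y, min p.2 y)

theorem altStep_eq_step :
    (fun (p : Int × Int) (y : Int) =>
      ((if y > p.1 then y else p.1 : Int), (if y < p.2 then y else p.2 : Int))) = pvStep := by
  funext p y
  simp only [pvStep, Prod.mk.injEq]
  constructor <;> split_ifs <;> omega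

-- the pairwise loop, fed an even-length tail, computes the same fold
theorem loop_eq_foldl : ∀ (l : List Int) (mx mn : Int), l.length % 2 = 0 →
    SimultaneousMinMaxLoop l mx mn = l.foldl pvStep (mx, mn)
  | [], mx, mn, _ => by simp [SimultaneousMinMaxLoop]
  | [a], mx, mn, h => by simp at h
  | a :: b :: rest, mx, mn, h => by
    have hr : rest.length % 2 = 0 := by simp [List.length] at h ⊢; omega
    simp only [SimultaneousMinMaxLoop, List.foldl]
    split_ifs with hab
    · rw [loop_eq_foldl rest _ _ hr]
      congr 1
      simp only [pvStep, Prod.mk.injEq]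
      constructor <;> omega
    · rw [loop_eq_foldl rest _ _ hr]
      congr 1
      simp only [pvStep, Prod.mk.injEq]
      constructor <;> omega

-- ===== VERDICT (by name: the statement is the Claim_ definition above) =====
theorem SimultaneousMinMax_spec : Claim_equal_SimultaneousMinMax := by
  intro A _ hpre
  unfold Spec_SimultaneousMinMax SimultaneousMinMax SimultaneousMinMax_alt
  rw [altStep_eq_step]
  match A with
  | [] => exact absurd rfl hpre
  | [x] =>
      simp [SimultaneousMinMaxLoop, List.foldl]
  | x :: y :: rest =>
      by_cases hodd : (x :: y :: rest).length % 2 = 1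
      · have hev : (y :: rest).length % 2 = 0 := by
          simp [List.length] at hodd ⊢; omega
        simp only [hodd]
        simp [loop_eq_foldl _ _ _ hev]
      · have hev : rest.length % 2 = 0 := by
          simp [List.length] at hodd ⊢; omega
        have h2 : ((x :: y :: rest).length % 2 == 1) = false := by
          simp only [beq_eq_false_iff_ne]; exact hodd
        simp only [h2, Bool.false_eq_true, if_false, List.foldl]
        split_ifs with hxy
        · rw [loop_eq_foldl _ _ _ hev]
          congr 1
          simp only [pvStep, Prod.mk.injEq]
          constructor <;> omega
        · rw [loop_eq_foldl _ _ _ hev]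
          congr 1
          simp only [pvStep, Prod.mk.injEq]
          constructor <;> omega
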